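-- pv_equiv track=rewrite | github.com/yanngasner/algorithmsChallenge | LeetCodeChallenges/maximumProductSubarray.py | getResultAfterFirstNegative
-- ===== SOURCE A (Python) =====
-- from typing import List
--
-- def getResultAfterFirstNegative(nums: List[int]) -> int:
--     result = 1
--     start = False
--     for i in range(0, len(nums)):
--         if not start:
--             if nums[i] < 0:
--                 start = True
--             if i == len(nums) - 1:
--                 return nums[i]
--         else:
--             result *= nums[i]
--     return result
-- ===== SOURCE B (Python) =====
-- def getResultAfterFirstNegative(nums):
--     ans = 1
--     prod = 1
--     empty = True
--     for x in reversed(nums):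
--         if empty:
--             ans = x
--         elif x < 0:
--             ans = prod
--         prod *= x
--         empty = False
--     return ans
-- ===== Notes on version B (the rewrite author's own statement) =====
-- stated objective: alternative
-- what changed: Replaces the forward flag-driven pass (search for the first negative, then accumulate a product) by a single backward pass over reversed(nums) that maintains the running suffix product and the current answer, overwriting the answer whenever a negative is met; no flag, no search, no slice.
import Mathlib
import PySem

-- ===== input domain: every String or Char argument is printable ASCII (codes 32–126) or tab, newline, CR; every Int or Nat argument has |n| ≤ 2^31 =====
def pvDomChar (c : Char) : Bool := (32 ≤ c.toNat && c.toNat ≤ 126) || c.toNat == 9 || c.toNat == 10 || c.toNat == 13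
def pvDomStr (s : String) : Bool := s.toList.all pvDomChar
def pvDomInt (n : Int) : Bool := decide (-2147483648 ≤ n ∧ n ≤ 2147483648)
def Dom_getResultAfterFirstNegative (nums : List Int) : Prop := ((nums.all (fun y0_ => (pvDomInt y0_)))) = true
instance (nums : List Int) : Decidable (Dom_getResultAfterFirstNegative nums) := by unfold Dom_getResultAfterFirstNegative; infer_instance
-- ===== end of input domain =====

-- B replaces A's forward flag-driven pass by a single backward pass over the
-- reversed list that maintains the running suffix product and the answer
-- (objective: alternative algorithm, same cost).

-- ===== PORT A =====
-- A's for-loop over range(0, len(nums)) carrying (result, start), with both early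
-- returns; fuel = nums.length bounds the iteration count (never exhausted in range).
def pvALoop (nums : List Int) (fuel i : Nat) (result : Int) (start : Bool) : Int :=
  match fuel with
  | 0 => result
  | fuel + 1 =>
    if h : i < nums.length then
      if !start then
        let start' := if nums[i] < 0 then true else start
        if i = nums.length - 1 then nums[i]
        else pvALoop nums fuel (i + 1) result start'
      else pvALoop nums fuel (i + 1) (result * nums[i]) start
    else result

def getResultAfterFirstNegative (nums : List Int) : Int :=
  pvALoop nums nums.length 0 1 false

-- ===== PORT B =====
-- Source B's loop body over reversed(nums): state (ans, prod, empty);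
-- 'prod *= x' is prod * x, 'empty = False' at the end of each iteration.
def pvBStep (st : Int × Int × Bool) (x : Int) : Int × Int × Bool :=
  match st with
  | (ans, p, empty) =>
    ((if empty then x else if x < 0 then p else ans), p * x, false)

-- 'for x in reversed(nums)' = a left fold over nums.reverse.
def getResultAfterFirstNegative_alt (nums : List Int) : Int :=
  (nums.reverse.foldl pvBStep (1, 1, true)).1

-- ===== PRECONDITION & SPEC =====
def Spec_getResultAfterFirstNegative (nums : List Int) (out : Int) : Prop := out = getResultAfterFirstNegative_alt nums
instance (nums : List Int) (out : Int) : Decidable (Spec_getResultAfterFirstNegative nums out) := by unfold Spec_getResultAfterFirstNegative; infer_instance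

-- ===== CLAIM (what is proved, stated in full; the proofs are below) =====
def Claim_equal_getResultAfterFirstNegative : Prop := ∀ (nums : List Int), Dom_getResultAfterFirstNegative nums → Spec_getResultAfterFirstNegative nums (getResultAfterFirstNegative nums)

-- ===== LEMMAS AND PROOFS =====

-- Common characterisation of the result, used on both sides of the proof.
def pvProd (xs : List Int) : Int := xs.foldr (fun x p => x * p) 1

def pvSpec : List Int → Int
  | [] => 1
  | [x] => x
  | x :: y :: xs => if x < 0 then pvProd (y :: xs) else pvSpec (y :: xs)

lemma foldl_mul_eq (xs : List Int) : ∀ c : Int,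
    xs.foldl (fun p x => p * x) c = c * pvProd xs := by
  induction xs with
  | nil => intro c; simp [pvProd]
  | cons x xs ih =>
      intro c
      rw [List.foldl_cons, ih]
      simp [pvProd, mul_assoc]

-- Once start = True, A's loop multiplies the remaining elements.
lemma pvALoop_true (nums : List Int) :
    ∀ fuel k r, nums.length - k ≤ fuel →
      pvALoop nums fuel k r true = (nums.drop k).foldl (fun p x => p * x) r := by
  intro fuel
  induction fuel with
  | zero =>
      intro k r hk
      have hk' : nums.length ≤ k := by omega
      simp [pvALoop, List.drop_eq_nil_of_le hk']
  | succ n ih =>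
      intro k r hk
      by_cases h : k < nums.length
      · rw [pvALoop]
        simp only [dif_pos h, Bool.not_true, Bool.false_eq_true, if_false]
        rw [List.drop_eq_getElem_cons h]
        simp only [List.foldl_cons]
        exact ih (k + 1) (r * nums[k]) (by omega)
      · rw [pvALoop]
        simp [dif_neg h, List.drop_eq_nil_of_le (by omega : nums.length ≤ k)]

-- While no negative has been seen, A's loop computes pvSpec of the remaining suffix.
lemma pvALoop_false (nums : List Int) :
    ∀ fuel j, nums.length - j ≤ fuel → j < nums.length →
      pvALoop nums fuel j 1 false = pvSpec (nums.drop j) := by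
  intro fuel
  induction fuel with
  | zero => intro j hA hj; omega
  | succ n ih =>
      intro j hA hj
      by_cases hlt : j < nums.length - 1
      · have hne : ¬ j = nums.length - 1 := by omega
        rw [pvALoop]
        simp only [dif_pos hj, Bool.not_false, if_true, if_neg hne]
        have hdrop : nums.drop j = nums[j] :: nums.drop (j + 1) :=
          List.drop_eq_getElem_cons hj
        have hdrop1 : nums.drop (j + 1) ≠ [] := by
          simp [List.drop_eq_nil_iff]; omega
        obtain ⟨y, ys, hys⟩ := List.exists_cons_of_ne_nil hdrop1
        by_cases hneg : nums[j] < 0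
        · simp only [if_pos hneg]
          rw [pvALoop_true nums n (j + 1) 1 (by omega), hdrop, hys, pvSpec,
            if_pos hneg, ← hys, foldl_mul_eq, one_mul]
        · simp only [if_neg hneg]
          rw [ih (j + 1) (by omega) (by omega), hdrop, hys, pvSpec, if_neg hneg, ← hys]
      · -- j = len - 1 : A returns nums[j]; drop j is the singleton [nums[j]]
        have hj' : j = nums.length - 1 := by omega
        rw [pvALoop]
        simp only [dif_pos hj, Bool.not_false, if_true, if_pos hj']
        have : nums.drop j = [nums[j]] := by
          rw [List.drop_eq_getElem_cons hj]
          have : nums.drop (j + 1) = [] := by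
            rw [List.drop_eq_nil_iff]; omega
          rw [this]
        rw [this, pvSpec]

lemma A_eq_spec (nums : List Int) : getResultAfterFirstNegative nums = pvSpec nums := by
  cases nums with
  | nil => rfl
  | cons x xs =>
      unfold getResultAfterFirstNegative
      have := pvALoop_false (x :: xs) (x :: xs).length 0 (by omega) (by simp)
      simpa using this

-- B's backward fold carries (pvSpec, pvProd, isEmpty) of the processed suffix.
lemma B_fold_inv (nums : List Int) :
    nums.foldr (fun x st => pvBStep st x) (1, 1, true)
      = (pvSpec nums, pvProd nums, nums.isEmpty) := by
  induction nums with
  | nil => rfl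
  | cons x xs ih =>
      rw [List.foldr_cons, ih]
      cases xs with
      | nil => simp [pvBStep, pvSpec, pvProd]
      | cons y ys =>
          simp [pvBStep, pvSpec, pvProd, mul_comm]

lemma B_eq_spec (nums : List Int) : getResultAfterFirstNegative_alt nums = pvSpec nums := by
  unfold getResultAfterFirstNegative_alt
  rw [List.foldl_reverse]
  rw [show (fun (x : Int) (st : Int × Int × Bool) => pvBStep st x)
        = (fun x st => pvBStep st x) from rfl, B_fold_inv]

-- ===== VERDICT (by name: the statement is the Claim_ definition above) =====
theorem getResultAfterFirstNegative_spec : Claim_equal_getResultAfterFirstNegative := by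
  intro nums _
  unfold Spec_getResultAfterFirstNegative
  rw [A_eq_spec, B_eq_spec]
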